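/- GENERATED by mk_final_copies.py from the proof of the farm's unit `start_decoder.R11` (farm:start_decoder.R11.1: Proof.lean) as the
   re-elaboration sweep compiled it — do not edit. -/
import Asan.CheckWalk
import Vorbis.Spec.Units.start_decoder_R11
import Vorbis.Spec.Worked.start_decoder_R11_Lemmas

open X86 X86.User Asan Vorbis Vorbis.Spec Vorbis.Spec.StartDecoder

set_option maxRecDepth 4000
set_option maxHeartbeats 4000000

namespace Vorbis.Spec.start_decoder_R11

/-- **0x11635d … 0x11636a** (C line 4121, `get_bits(f, 2)`): from the entry assertion to the return of `get_bits` (cut298): the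
mapping loop's assertion is carried over the reader's footprint (`Quiet.of_off`, `Quiet.carry`). -/
theorem entry_to_bits2 (Lay : Layout) (hLay : Lay.hi = 0x1000000) (μ : Microarch) (hμ : UserX.MicroOK μ) (u₀ : State)
    (hcode : HasCodeNat Lay u₀ Vorbis.L.start_decoder.entry Vorbis.Code.code_start_decoder.nat Vorbis.L.start_decoder.size)
    (h_gb : ∀ (others : List Obj) (frames : List (Nat × FrameLayout)) (Blk : Block → Prop) (len : Nat), Calls Lay μ Vorbis.WayInv (Vorbis.conv u₀) Vorbis.L.get_bits.entry (Vorbis.Spec.get_bits.spec others frames Blk len))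
    (g : Ghost) (i : Nat) (A7 A7c Ai : Arena) (A : Arena × List Obj) (v : State)
    (hpt : Pt u₀ g i pc_R11 A7 A7c Ai A v) :
    ReachVia Lay μ WayInv v (fun w => Pt u₀ g i Vorbis.L.start_decoder.cut298 A7 A7c Ai A w) := by
  obtain ⟨hloop, hrbx, hcur⟩ := hpt
  have hfr := hloop.frame
  have he := hfr.entry
  v_entry he
  simp only [depth] at he_room he_stack
  have hR := hfr.r_eq
  have hfw := f_where hfr hloop.hand
  have ef : g.f = (g.e.reg .rdi).toNat := rfl
  have eRA : g.RA = (g.e.reg .rsp).toNat := rfl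
  simp only [steady] at hR
  have v_rip := hfr.rip
  have v_rsp : v.reg .rsp = g.e.reg .rsp - 1480 := by
    rw [hfr.rsp]
    apply UInt64.toNat_inj.mp
    rw [toNat_addr _ (by omega)]
    u_omega
  have v_rbp : v.reg .rbp = g.e.reg .rdi := by
    rw [hloop.rbp, ef, addr_toNat]
  have v_eq : Mem.EqOn Vorbis.L.textLo Vorbis.L.textHi u₀.mem v.mem := hfr.code
  have hdf : v.flags .df = false := (show abiInv _ from hfr.inv).1
  have hmx : v.mxcsr &&& 0x1F80 = 0x1F80 := (show abiInv _ from hfr.inv).2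
  have hsse := Vorbis.sseOK_of_abiInv hfr.inv
  have hgb := h_gb A.2 g.frames' (g.Blk A) g.len
  u_walk hcode [hμ.vendor] until [Vorbis.L.start_decoder.cut298] span [Vorbis.L.textLo, Vorbis.L.textHi] side (v_side)
  · v_inv
  · have hrsp : (s_116365.reg .rsp).toNat + 8 = g.R := by
      rw [w_rsp]
      u_omega
    have hrdi : (s_116365.reg .rdi).toNat = g.f := by
      rw [w_rdi]
      exact ef.symm
    have hun : ShadowUntouched v.mem s_116365.mem := by v_untouched
    refine ⟨⟨shadowPre_call hfr hrsp hun, ?_, ?_⟩, ?_⟩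
    · rw [hrdi]
      exact readerEnv_mid hloop.hand hloop.mid
    · rw [hrdi, w_mem]
      exact (Vorbis.Spec.Reader.store_off_obj hloop.mid.bits _ 8 _ (by u_omega) (by u_omega)).1.bits
    · unfold bitsArg
      rw [w_rsi]
      decide
  · v_after_call w_rsp_116365 w_mem_116365
    have c_rdi : s_116365.reg .rdi = g.e.reg .rdi := w_rdi_116365
    simp only [c_rdi] at w_same
    have hs0 : Mem.SameExcept
        [⟨(g.e.reg .rsp).toNat - 1480 - 400, (g.e.reg .rsp).toNat - 1480⟩,
         ⟨(g.e.reg .rsp).toNat - 1480 + 0x18, (g.e.reg .rsp).toNat - 1480 + 0x1c⟩,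
         ⟨(g.e.reg .rdi).toNat + 48, (g.e.reg .rdi).toNat + 56⟩,
         ⟨(g.e.reg .rdi).toNat + 84, (g.e.reg .rdi).toNat + 96⟩,
         ⟨(g.e.reg .rdi).toNat + 136, (g.e.reg .rdi).toNat + 144⟩,
         ⟨(g.e.reg .rdi).toNat + 1484, (g.e.reg .rdi).toNat + 1749⟩,
         ⟨(g.e.reg .rdi).toNat + 1752, (g.e.reg .rdi).toNat + 1784⟩] v.mem s_116365r.mem := by
      u_same
    have hs : Mem.SameExcept (offWins g) v.mem s_116365r.mem := hs0
    have hq := Quiet.of_off hloop hcur hs 0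
    have hpost : GetBitsSpecPost (g.Blk A) g.len (s_116365.reg .rdi).toNat (bitsArg s_116365) s_116365 s_116365r := w_post
    have hbits : Bits (g.Blk A) g.len s_116365r.mem g.f := by
      have hb := hpost.bits.bits
      rw [c_rdi] at hb
      exact hb
    have hrsp' : s_116365r.reg .rsp = addr g.R := by
      rw [w_rsp]
      apply UInt64.toNat_inj.mp
      rw [toNat_addr _ (by omega)]
      u_omega
    have hrbp' : s_116365r.reg .rbp = addr g.f := by
      rw [w_kept.get .rbp rfl]
      exact hloop.rbp
    have hcar := hq.carry hloop hcur hbits w_rip hrsp' hrbp' w_eq ⟨w_df, w_mx⟩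
    refine ReachVia.done ⟨hcar.1, ?_, hcar.2.1⟩
    rw [w_kept.get .rbx rfl, hcar.2.2]
    exact hrbx

/-- **0x11636a … the two loop heads / the epilogue** (C lines 4121 – 4122): `test eax, eax` (≠ 0: `error`, `jmp 113b22`: `AtERR`);
the check of `m->submaps`; `r13d = j = 0` (the literal 0 of `[rsp+24H]`, Z24) at the head of loop 4123 (0x11645e) or 4129
(0x1163ae). -/
theorem bits2_to_heads (Lay : Layout) (hLay : Lay.hi = 0x1000000) (μ : Microarch) (hμ : UserX.MicroOK μ) (u₀ : State)
    (hcode : HasCodeNat Lay u₀ Vorbis.L.start_decoder.entry Vorbis.Code.code_start_decoder.nat Vorbis.L.start_decoder.size)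
    (h_err : ∀ (others : List Obj) (frames : List (Nat × FrameLayout)), Calls Lay μ Vorbis.WayInv (Vorbis.conv u₀) Vorbis.L.error.entry (Vorbis.Spec.error.spec others frames))
    (h_l1 : Asan.SmallCheck Lay μ Vorbis.WayInv (Vorbis.CodeOK u₀) [.rax, .rdx] 1 Vorbis.L.__asan_load1_noabort.entry)
    (g : Ghost) (i : Nat) (A7 A7c Ai : Arena) (A : Arena × List Obj) (v : State)
    (hpt : Pt u₀ g i Vorbis.L.start_decoder.cut298 A7 A7c Ai A v) :
    ReachVia Lay μ WayInv v (fun w => LoopPt u₀ g i Vorbis.L.start_decoder.loop38 0 A7 A7c Ai A w ∨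
      LoopPt u₀ g i Vorbis.L.start_decoder.loop39 0 A7 A7c Ai A w ∨ AtERR u₀ g w) := by
  have hloop := hpt.loop
  have hcur := hpt.cur
  have hfr := hloop.frame
  have he := hfr.entry
  v_entry he
  simp only [depth] at he_room he_stack
  have hR := hfr.r_eq
  simp only [steady] at hR
  have hfw := f_where hfr hloop.hand
  have ef : g.f = (g.e.reg .rdi).toNat := rfl
  have eRA : g.RA = (g.e.reg .rsp).toNat := rfl
  obtain ⟨eR, efw, z24⟩ := hpt.words
  have v_rip := hfr.rip
  have v_rsp : v.reg .rsp = g.e.reg .rsp - 1480 := by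
    rw [hfr.rsp, eR]
  have v_rbp : v.reg .rbp = g.e.reg .rdi := by
    rw [hloop.rbp, efw]
  have v_rbx := hpt.rbx
  have v_eq : Mem.EqOn Vorbis.L.textLo Vorbis.L.textHi u₀.mem v.mem := hfr.code
  have hdf : v.flags .df = false := (show abiInv _ from hfr.inv).1
  have hmx : v.mxcsr &&& 0x1F80 = 0x1F80 := (show abiInv _ from hfr.inv).2
  have hsse := Vorbis.sseOK_of_abiInv hfr.inv
  have herr := h_err A.2 g.frames'
  u_walk hcode [hμ.vendor] until [Vorbis.L.start_decoder.loop38, Vorbis.L.start_decoder.loop39, Vorbis.L.start_decoder.cut4] span [Vorbis.L.textLo, Vorbis.L.textHi] side (v_side)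
  · -- 0x11639a: the check of `m->submaps`
    have hun : ShadowUntouched v.mem s_11639a.mem := by v_untouched
    have hs := hpt.site_rec 16 1 (by omega) (by omega)
    have hin := hs.inside hloop.mid.env.covers
    exact Vorbis.Spec.check_site hfr.shadow hun hs (by rw [addr_add_lit, toNat_addr _ (by omega)])
  · v_inv
  · -- the precondition of `error`
    have hrsp : (s_116376.reg .rsp).toNat + 8 = g.R := by
      rw [w_rsp]
      u_omega
    have hun : ShadowUntouched v.mem s_116376.mem := by v_untouched
    refine ⟨shadowPre_call hfr hrsp hun, ?_⟩
    rw [w_rdi, ← ef]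
    exact hloop.hand.obj.mono (frames'_sub g A.2)
  · -- submaps > 1: to the head of loop 4123
    have hs0 : Mem.SameExcept
        [⟨(g.e.reg .rsp).toNat - 1480 - 400, (g.e.reg .rsp).toNat - 1480⟩,
         ⟨(g.e.reg .rsp).toNat - 1480 + 0x18, (g.e.reg .rsp).toNat - 1480 + 0x1c⟩,
         ⟨(g.e.reg .rdi).toNat + 136, (g.e.reg .rdi).toNat + 144⟩] v.mem s_116480.mem := by
      u_same
    have hn := narrow_ok hfr hloop.hand hloop.mid.bits hs0
    have hq := Quiet.of_off hloop hcur hn.1 0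
    have hinv' : abiInv s_116480 := by v_inv
    have hcore := hpt.core0.carry hq (Nat.le_refl _) hn.2 w_rip (by rw [w_rsp, eR]) (w_kept.get .rbp rfl)
      (w_kept.get .rbx rfl) w_eq hinv'
    refine ReachVia.done (Or.inr (Or.inl ⟨hcore, ?_⟩))
    rw [w_r13]
    rfl
  · -- submaps ≤ 1: to the head of loop 4129
    have hs0 : Mem.SameExcept
        [⟨(g.e.reg .rsp).toNat - 1480 - 400, (g.e.reg .rsp).toNat - 1480⟩,
         ⟨(g.e.reg .rsp).toNat - 1480 + 0x18, (g.e.reg .rsp).toNat - 1480 + 0x1c⟩,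
         ⟨(g.e.reg .rdi).toNat + 136, (g.e.reg .rdi).toNat + 144⟩] v.mem s_1163a9.mem := by
      u_same
    have hn := narrow_ok hfr hloop.hand hloop.mid.bits hs0
    have hq := Quiet.of_off hloop hcur hn.1 0
    have hinv' : abiInv s_1163a9 := by v_inv
    have hcore := hpt.core0.carry hq (Nat.le_refl _) hn.2 w_rip (by rw [w_rsp, eR]) (w_kept.get .rbp rfl)
      (w_kept.get .rbx rfl) w_eq hinv'
    refine ReachVia.done (Or.inl ⟨hcore, ?_⟩)
    rw [w_r13]
    rfl
  · -- `error` returned: `jmp 113b22`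
    v_after_call w_rsp_116376 w_mem_116376
    have c_rdi : s_116376.reg .rdi = g.e.reg .rdi := w_rdi_116376
    simp only [c_rdi] at w_same
    have hs0 : Mem.SameExcept
        [⟨(g.e.reg .rsp).toNat - 1480 - 400, (g.e.reg .rsp).toNat - 1480⟩,
         ⟨(g.e.reg .rsp).toNat - 1480 + 0x18, (g.e.reg .rsp).toNat - 1480 + 0x1c⟩,
         ⟨(g.e.reg .rdi).toNat + 136, (g.e.reg .rdi).toNat + 144⟩] v.mem s_116376r.mem := by
      u_same
    obtain ⟨hrax, _, _⟩ := w_post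
    u_walk hcode [hμ.vendor] until [Vorbis.L.start_decoder.cut4] span [Vorbis.L.textLo, Vorbis.L.textHi] side (v_side)
    rw [← w_mem] at hs0
    have hn := narrow_ok hfr hloop.hand hloop.mid.bits hs0
    have hq := Quiet.of_off hloop hcur hn.1 0
    have hinv' : abiInv s_11637b := by v_inv
    have hpt' := hpt.carry hq hn.2 w_rip (by rw [w_rsp, eR]) (w_kept.get .rbp rfl) (w_kept.get .rbx rfl) w_eq hinv'
    refine ReachVia.done (Or.inr (Or.inr (hpt'.err ?_)))
    rw [w_rax]
    rfl

/-- **One round of loop 4129** (head 0x1163ae, `m->chan[j].mux = 0`): the loop is left to R12 (0x116545, `r13d = 0`) with every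
channel done, or channel `j` is stored (three checks; `0 < submaps` by MP3) and the head is reached with `j + 1`. -/
theorem loop38_round (Lay : Layout) (hLay : Lay.hi = 0x1000000) (μ : Microarch) (hμ : UserX.MicroOK μ) (u₀ : State)
    (hcode : HasCodeNat Lay u₀ Vorbis.L.start_decoder.entry Vorbis.Code.code_start_decoder.nat Vorbis.L.start_decoder.size)
    (h_l4 : Asan.SmallCheck Lay μ Vorbis.WayInv (Vorbis.CodeOK u₀) [.rax, .rcx, .rdx] 4 Vorbis.L.__asan_load4_noabort.entry)
    (h_l8 : Asan.SmallCheck Lay μ Vorbis.WayInv (Vorbis.CodeOK u₀) [.rax, .rcx, .rdx] 8 Vorbis.L.__asan_load8_noabort.entry)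
    (h_s1 : Asan.SmallCheck Lay μ Vorbis.WayInv (Vorbis.CodeOK u₀) [.rax, .rdx] 1 Vorbis.L.__asan_store1_noabort.entry)
    (g : Ghost) (i j : Nat) (A7 A7c Ai : Arena) (A : Arena × List Obj) (v : State)
    (hlp : LoopPt u₀ g i Vorbis.L.start_decoder.loop38 j A7 A7c Ai A v) :
    ReachVia Lay μ WayInv v (fun w => AtR12 u₀ g i w ∨
      (LoopPt u₀ g i Vorbis.L.start_decoder.loop38 (j + 1) A7 A7c Ai A w ∧ (j : Int) < stb_vorbis.channels v.mem g.f ∧ stb_vorbis.channels w.mem g.f = stb_vorbis.channels v.mem g.f)) := by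
  have hpt := hlp.core.pt
  have hloop := hpt.loop
  have hcur := hpt.cur
  have hfr := hloop.frame
  have he := hfr.entry
  v_entry he
  simp only [depth] at he_room he_stack
  have hR := hfr.r_eq
  simp only [steady] at hR
  have hfw := f_where hfr hloop.hand
  have ef : g.f = (g.e.reg .rdi).toNat := rfl
  have eRA : g.RA = (g.e.reg .rsp).toNat := rfl
  obtain ⟨eR, efw, z24⟩ := hpt.words
  have v_rip := hfr.rip
  have v_rsp : v.reg .rsp = g.e.reg .rsp - 1480 := by
    rw [hfr.rsp, eR]
  have v_rbp : v.reg .rbp = g.e.reg .rdi := by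
    rw [hloop.rbp, efw]
  obtain ⟨mw, v_rbx⟩ : ∃ mw : Word, v.reg .rbx = mw := ⟨_, rfl⟩
  have hmw : mw = addr (mapAt g v.mem i) := v_rbx.symm.trans hpt.rbx
  have v_eq : Mem.EqOn Vorbis.L.textLo Vorbis.L.textHi u₀.mem v.mem := hfr.code
  have hdf : v.flags .df = false := (show abiInv _ from hfr.inv).1
  have hmx : v.mxcsr &&& 0x1F80 = 0x1F80 := (show abiInv _ from hfr.inv).2
  have hsse := Vorbis.sseOK_of_abiInv hfr.inv
  have v_r13 : v.reg .r13 = UInt64.ofNat j := hlp.r13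
  obtain ⟨C, ch, hC, hC1, hC16, hch, r4, r8, r16, hmN, hm1, hm2, hm3, hc1, hc2, hc3, _⟩ := hpt.loads mw hmw
  have hjle := hlp.core.j_le
  have hj16 : j ≤ 16 := by omega
  have hsx := sext_small j hj16
  u_walk hcode [hμ.vendor, hsx] until [Vorbis.L.start_decoder.loop38, Vorbis.L.start_decoder.cut310] span [Vorbis.L.textLo, Vorbis.L.textHi] side (v_side)
  · -- 0x1163b2: the check of `f->channels`
    have hun : ShadowUntouched v.mem s_1163b2.mem := by v_untouched
    exact Vorbis.Spec.check_site hfr.shadow hun (hpt.site_f 4 4 (by omega) (by omega)) (by u_omega)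
  · -- 0x1163c5: the check of `m->chan`
    have hun : ShadowUntouched v.mem s_1163c5.mem := by v_untouched
    refine Vorbis.Spec.check_site hfr.shadow hun (hpt.site_rec 8 8 (by omega) (by omega)) ?_
    rw [← hmN]
    u_omega
  · -- 0x1163da: the check of `chan[j].mux`
    have hun : ShadowUntouched v.mem s_1163da.mem := by v_untouched
    have hjC : j < C := by
      have h := mt (cmp_small C j hC16 hj16).mpr hbr_1163bb
      omega
    refine Vorbis.Spec.check_site hfr.shadow hun (hpt.site_mux j (by omega)) ?_
    rw [hch]
    clear hm3 hc3 hfw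
    u_omega
  · -- the loop is left: `r13d = 0`, to R12
    have hCj : C ≤ j := (cmp_small C j hC16 hj16).mp hbr_1163bb
    have hs0 : Mem.SameExcept
        [⟨(g.e.reg .rsp).toNat - 1480 - 400, (g.e.reg .rsp).toNat - 1480⟩,
         ⟨(g.e.reg .rsp).toNat - 1480 + 0x18, (g.e.reg .rsp).toNat - 1480 + 0x1c⟩,
         ⟨(g.e.reg .rdi).toNat + 136, (g.e.reg .rdi).toNat + 144⟩] v.mem s_116476.mem := by
      u_same
    have hn := narrow_ok hfr hloop.hand hloop.mid.bits hs0
    have hq := Quiet.of_off hloop hcur hn.1 j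
    have hinv' : abiInv s_116476 := by v_inv
    have hcore := hlp.core.carry hq (Nat.le_refl _) hn.2 w_rip (by rw [w_rsp, eR]) (w_kept.get .rbp rfl)
      (w_kept.get .rbx rfl) w_eq hinv'
    refine ReachVia.done (Or.inl (hcore.r12 ?_ ?_))
    · rw [hq.scalars.1, hC]
      omega
    · rw [w_r13]
      rfl
  · -- the back edge
    have hjC : j < C := by
      have h := mt (cmp_small C j hC16 hj16).mpr hbr_1163bb
      omega
    have hjC' : (j : Int) < stb_vorbis.channels v.mem g.f := by omega
    have ea : UInt64.ofNat j * 3 + UInt64.ofNat ch + 2 = addr (Mapping.chan v.mem (mapAt g v.mem i) + 3 * j + 2) := by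
      rw [hch]
      apply UInt64.toNat_inj.mp
      rw [toNat_addr _ (by omega)]
      clear hm3 hc3 hfw
      u_omega
    rw [ea] at w_mem
    have hs1 : Mem.SameExcept (narrowWins g) v.mem (v.mem.writeLE (g.e.reg .rsp - 1488) 8 1139679) := by
      apply Mem.SameExcept.writeLE
      · u_omega
      · refine ⟨⟨g.R - 400, g.R⟩, List.mem_cons_self, ?_, ?_⟩
        · simp only []
          u_omega
        · simp only []
          u_omega
    have hn := narrow_ok hfr hloop.hand hloop.mid.bits hs1
    have hq := Quiet.store hloop hcur hn.1 j hjC' 0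
    have hbits := bits_store hloop hcur hn.2 j hjC' 0
    rw [← w_mem] at hq hbits
    have hinv' : abiInv s_1163e9 := by v_inv
    have hcore := hlp.core.carry hq (Nat.le_refl _) hbits w_rip (by rw [w_rsp, eR]) (w_kept.get .rbp rfl)
      (w_kept.get .rbx rfl) w_eq hinv'
    have hval : s_1163e9.mem.u8 (Mapping.chan v.mem (mapAt g v.mem i) + 3 * j + 2) <
        Mapping.submaps v.mem (mapAt g v.mem i) := by
      rw [w_mem, Mem.u8_writeLE_same]
      have := hcur.MP3.1
      omega
    have hmux := hq.mux_new hloop.maps hcur hval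
    have eC := hq.scalars.1
    refine ReachVia.done (Or.inr ⟨⟨hcore.succ (by rw [eC]; exact hjC') hmux, ?_⟩, hjC', eC⟩)
    rw [w_r13]
    exact inc_small j hj16

/-- **The head of loop 4123** (0x11645e) **to the return of `get_bits(f, 4)`** (cut302, 0x1163f8): the loop is left to R12 with
every channel done, or `j < C` and the reader returned. -/
theorem loop39_head (Lay : Layout) (hLay : Lay.hi = 0x1000000) (μ : Microarch) (hμ : UserX.MicroOK μ) (u₀ : State)
    (hcode : HasCodeNat Lay u₀ Vorbis.L.start_decoder.entry Vorbis.Code.code_start_decoder.nat Vorbis.L.start_decoder.size)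
    (h_gb : ∀ (others : List Obj) (frames : List (Nat × FrameLayout)) (Blk : Block → Prop) (len : Nat), Calls Lay μ Vorbis.WayInv (Vorbis.conv u₀) Vorbis.L.get_bits.entry (Vorbis.Spec.get_bits.spec others frames Blk len))
    (h_l4 : Asan.SmallCheck Lay μ Vorbis.WayInv (Vorbis.CodeOK u₀) [.rax, .rcx, .rdx] 4 Vorbis.L.__asan_load4_noabort.entry)
    (g : Ghost) (i j : Nat) (A7 A7c Ai : Arena) (A : Arena × List Obj) (v : State)
    (hlp : LoopPt u₀ g i Vorbis.L.start_decoder.loop39 j A7 A7c Ai A v) :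
    ReachVia Lay μ WayInv v (fun w => AtR12 u₀ g i w ∨
      (LoopPt u₀ g i Vorbis.L.start_decoder.cut302 j A7 A7c Ai A w ∧ (j : Int) < stb_vorbis.channels v.mem g.f ∧
        stb_vorbis.channels w.mem g.f = stb_vorbis.channels v.mem g.f)) := by
  have hpt := hlp.core.pt
  have hloop := hpt.loop
  have hcur := hpt.cur
  have hfr := hloop.frame
  have he := hfr.entry
  v_entry he
  simp only [depth] at he_room he_stack
  have hR := hfr.r_eq
  simp only [steady] at hR
  have hfw := f_where hfr hloop.hand
  have ef : g.f = (g.e.reg .rdi).toNat := rfl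
  have eRA : g.RA = (g.e.reg .rsp).toNat := rfl
  obtain ⟨eR, efw, z24⟩ := hpt.words
  have v_rip := hfr.rip
  have v_rsp : v.reg .rsp = g.e.reg .rsp - 1480 := by
    rw [hfr.rsp, eR]
  have v_rbp : v.reg .rbp = g.e.reg .rdi := by
    rw [hloop.rbp, efw]
  obtain ⟨mw, v_rbx⟩ : ∃ mw : Word, v.reg .rbx = mw := ⟨_, rfl⟩
  have hmw : mw = addr (mapAt g v.mem i) := v_rbx.symm.trans hpt.rbx
  have v_eq : Mem.EqOn Vorbis.L.textLo Vorbis.L.textHi u₀.mem v.mem := hfr.code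
  have hdf : v.flags .df = false := (show abiInv _ from hfr.inv).1
  have hmx : v.mxcsr &&& 0x1F80 = 0x1F80 := (show abiInv _ from hfr.inv).2
  have hsse := Vorbis.sseOK_of_abiInv hfr.inv
  have v_r13 : v.reg .r13 = UInt64.ofNat j := hlp.r13
  obtain ⟨C, ch, hC, hC1, hC16, hch, r4, r8, r16, hmN, hm1, hm2, hm3, hc1, hc2, hc3, _⟩ := hpt.loads mw hmw
  have hjle := hlp.core.j_le
  have hj16 : j ≤ 16 := by omega
  have hgb := h_gb A.2 g.frames' (g.Blk A) g.len
  u_walk hcode [hμ.vendor] until [Vorbis.L.start_decoder.cut302, Vorbis.L.start_decoder.cut310] span [Vorbis.L.textLo, Vorbis.L.textHi] side (v_side)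
  · -- 0x116462: the check of `f->channels`
    have hun : ShadowUntouched v.mem s_116462.mem := by v_untouched
    exact Vorbis.Spec.check_site hfr.shadow hun (hpt.site_f 4 4 (by omega) (by omega)) (by u_omega)
  · v_inv
  · -- the precondition of `get_bits(f, 4)`
    have hrsp : (s_1163f3.reg .rsp).toNat + 8 = g.R := by
      rw [w_rsp]
      u_omega
    have hrdi : (s_1163f3.reg .rdi).toNat = g.f := by
      rw [w_rdi]
      exact ef.symm
    have hun : ShadowUntouched v.mem s_1163f3.mem := by v_untouched
    refine ⟨⟨shadowPre_call hfr hrsp hun, ?_, ?_⟩, ?_⟩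
    · rw [hrdi]
      exact readerEnv_mid hloop.hand hloop.mid
    · rw [hrdi, w_mem]
      exact (Vorbis.Spec.Reader.store_off_obj hloop.mid.bits _ 8 _ (by u_omega) (by u_omega)).1.bits
    · unfold bitsArg
      rw [w_rsi]
      decide
  · -- `get_bits` returned: the point 0x1163f8
    have hjC : j < C := by
      have h := mt (cmp_small C j hC16 hj16).mpr (Int.not_le.mpr hbr_11646b)
      omega
    v_after_call w_rsp_1163f3 w_mem_1163f3
    have c_rdi : s_1163f3.reg .rdi = g.e.reg .rdi := w_rdi_1163f3
    simp only [c_rdi] at w_same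
    have hs0 : Mem.SameExcept
        [⟨(g.e.reg .rsp).toNat - 1480 - 400, (g.e.reg .rsp).toNat - 1480⟩,
         ⟨(g.e.reg .rsp).toNat - 1480 + 0x18, (g.e.reg .rsp).toNat - 1480 + 0x1c⟩,
         ⟨(g.e.reg .rdi).toNat + 48, (g.e.reg .rdi).toNat + 56⟩,
         ⟨(g.e.reg .rdi).toNat + 84, (g.e.reg .rdi).toNat + 96⟩,
         ⟨(g.e.reg .rdi).toNat + 136, (g.e.reg .rdi).toNat + 144⟩,
         ⟨(g.e.reg .rdi).toNat + 1484, (g.e.reg .rdi).toNat + 1749⟩,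
         ⟨(g.e.reg .rdi).toNat + 1752, (g.e.reg .rdi).toNat + 1784⟩] v.mem s_1163f3r.mem := by
      u_same
    have hs : Mem.SameExcept (offWins g) v.mem s_1163f3r.mem := hs0
    have hq := Quiet.of_off hloop hcur hs j
    have hpost : GetBitsSpecPost (g.Blk A) g.len (s_1163f3.reg .rdi).toNat (bitsArg s_1163f3) s_1163f3 s_1163f3r := w_post
    have hbits : Bits (g.Blk A) g.len s_1163f3r.mem g.f := by
      have hb := hpost.bits.bits
      rw [c_rdi] at hb
      exact hb
    have hcore := hlp.core.carry hq (Nat.le_refl _) hbits w_rip (by rw [w_rsp, eR]) (w_kept.get .rbp rfl)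
      (w_kept.get .rbx rfl) w_eq ⟨w_df, w_mx⟩
    refine ReachVia.done (Or.inr ⟨⟨hcore, ?_⟩, by omega, hq.scalars.1⟩)
    rw [w_kept.get .r13 rfl]
    exact hlp.r13
  · -- the loop is left: `r13d = 0`, to R12
    have hCj : C ≤ j := by
      have h2 : ¬ ¬ (BitVec.ofNat 32 C).toInt ≤ (Word.part Width.w32 (UInt64.ofNat j)).toInt := by
        intro h3
        exact hbr_11646b (Int.not_le.mp h3)
      exact (cmp_small C j hC16 hj16).mp (Classical.not_not.mp h2)
    have hs0 : Mem.SameExcept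
        [⟨(g.e.reg .rsp).toNat - 1480 - 400, (g.e.reg .rsp).toNat - 1480⟩,
         ⟨(g.e.reg .rsp).toNat - 1480 + 0x18, (g.e.reg .rsp).toNat - 1480 + 0x1c⟩,
         ⟨(g.e.reg .rdi).toNat + 136, (g.e.reg .rdi).toNat + 144⟩] v.mem s_116476.mem := by
      u_same
    have hn := narrow_ok hfr hloop.hand hloop.mid.bits hs0
    have hq := Quiet.of_off hloop hcur hn.1 j
    have hinv' : abiInv s_116476 := by v_inv
    have hcore := hlp.core.carry hq (Nat.le_refl _) hn.2 w_rip (by rw [w_rsp, eR]) (w_kept.get .rbp rfl)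
      (w_kept.get .rbx rfl) w_eq hinv'
    refine ReachVia.done (Or.inl (hcore.r12 ?_ ?_))
    · rw [hq.scalars.1, hC]
      omega
    · rw [w_r13]
      rfl

/-- **0x1163f8 … the head of loop 4123** (C lines 4124 – 4125): the spill of `eax`, the store of `chan[j].mux` (check), its reload
(check) and the test `< m->submaps` (check): `jb` to the head with `j + 1` and MP5 of channel `j`, else `error`: `AtERR`. -/
theorem loop39_body (Lay : Layout) (hLay : Lay.hi = 0x1000000) (μ : Microarch) (hμ : UserX.MicroOK μ) (u₀ : State)
    (hcode : HasCodeNat Lay u₀ Vorbis.L.start_decoder.entry Vorbis.Code.code_start_decoder.nat Vorbis.L.start_decoder.size)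
    (h_err : ∀ (others : List Obj) (frames : List (Nat × FrameLayout)), Calls Lay μ Vorbis.WayInv (Vorbis.conv u₀) Vorbis.L.error.entry (Vorbis.Spec.error.spec others frames))
    (h_l1 : Asan.SmallCheck Lay μ Vorbis.WayInv (Vorbis.CodeOK u₀) [.rax, .rdx] 1 Vorbis.L.__asan_load1_noabort.entry)
    (h_l8 : Asan.SmallCheck Lay μ Vorbis.WayInv (Vorbis.CodeOK u₀) [.rax, .rcx, .rdx] 8 Vorbis.L.__asan_load8_noabort.entry)
    (h_s1 : Asan.SmallCheck Lay μ Vorbis.WayInv (Vorbis.CodeOK u₀) [.rax, .rdx] 1 Vorbis.L.__asan_store1_noabort.entry)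
    (g : Ghost) (i j : Nat) (A7 A7c Ai : Arena) (A : Arena × List Obj) (v : State)
    (hlp : LoopPt u₀ g i Vorbis.L.start_decoder.cut302 j A7 A7c Ai A v)
    (hjC' : (j : Int) < stb_vorbis.channels v.mem g.f) :
    ReachVia Lay μ WayInv v (fun w => AtERR u₀ g w ∨
      (LoopPt u₀ g i Vorbis.L.start_decoder.loop39 (j + 1) A7 A7c Ai A w ∧
        stb_vorbis.channels w.mem g.f = stb_vorbis.channels v.mem g.f)) := by
  have hpt := hlp.core.pt
  have hloop := hpt.loop
  have hcur := hpt.cur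
  have hfr := hloop.frame
  have he := hfr.entry
  v_entry he
  simp only [depth] at he_room he_stack
  have hR := hfr.r_eq
  simp only [steady] at hR
  have hfw := f_where hfr hloop.hand
  have ef : g.f = (g.e.reg .rdi).toNat := rfl
  have eRA : g.RA = (g.e.reg .rsp).toNat := rfl
  obtain ⟨eR, efw, z24⟩ := hpt.words
  have v_rip := hfr.rip
  have v_rsp : v.reg .rsp = g.e.reg .rsp - 1480 := by
    rw [hfr.rsp, eR]
  have v_rbp : v.reg .rbp = g.e.reg .rdi := by
    rw [hloop.rbp, efw]
  obtain ⟨mw, v_rbx⟩ : ∃ mw : Word, v.reg .rbx = mw := ⟨_, rfl⟩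
  have hmw : mw = addr (mapAt g v.mem i) := v_rbx.symm.trans hpt.rbx
  have v_eq : Mem.EqOn Vorbis.L.textLo Vorbis.L.textHi u₀.mem v.mem := hfr.code
  have hdf : v.flags .df = false := (show abiInv _ from hfr.inv).1
  have hmx : v.mxcsr &&& 0x1F80 = 0x1F80 := (show abiInv _ from hfr.inv).2
  have hsse := Vorbis.sseOK_of_abiInv hfr.inv
  have v_r13 : v.reg .r13 = UInt64.ofNat j := hlp.r13
  obtain ⟨C, ch, hC, hC1, hC16, hch, r4, r8, r16, hmN, hm1, hm2, hm3, hc1, hc2, hc3, hmc⟩ := hpt.loads mw hmw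
  have hjC : j < C := by omega
  have hj16 : j ≤ 16 := by omega
  have hsx := sext_small j hj16
  obtain ⟨z, v_rax⟩ : ∃ z, v.reg .rax = z := ⟨_, rfl⟩
  have herr := h_err A.2 g.frames'
  u_walk hcode [hμ.vendor, hsx] until [Vorbis.L.start_decoder.loop39, Vorbis.L.start_decoder.cut4] span [Vorbis.L.textLo, Vorbis.L.textHi] side (v_side)
  · -- 0x116400: the check of `m->chan`
    have hun : ShadowUntouched v.mem s_116400.mem := by v_untouched
    refine Vorbis.Spec.check_site hfr.shadow hun (hpt.site_rec 8 8 (by omega) (by omega)) ?_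
    rw [← hmN]
    clear hm3 hc3 hfw hmc
    u_omega
  · -- 0x116417: the check of the store `chan[j].mux`
    have hun : ShadowUntouched v.mem s_116417.mem := by v_untouched
    refine Vorbis.Spec.check_site hfr.shadow hun (hpt.site_mux j hjC') ?_
    rw [hch]
    clear hm3 hc3 hfw hmc
    u_omega
  · -- 0x11642e: the check of the load `chan[j].mux`
    have hun : ShadowUntouched v.mem s_11642e.mem := by v_untouched
    refine Vorbis.Spec.check_site hfr.shadow hun (hpt.site_mux j hjC') ?_
    rw [hch]
    clear hm3 hc3 hfw hmc
    u_omega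
  · -- 0x11643d: the check of `m->submaps`
    have hun : ShadowUntouched v.mem s_11643d.mem := by v_untouched
    refine Vorbis.Spec.check_site hfr.shadow hun (hpt.site_rec 16 1 (by omega) (by omega)) ?_
    rw [← hmN]
    clear hm3 hc3 hfw hmc
    u_omega
  · v_inv
  · -- the precondition of `error`
    have hrsp : (s_116450.reg .rsp).toNat + 8 = g.R := by
      rw [w_rsp]
      u_omega
    have hun : ShadowUntouched v.mem s_116450.mem := by v_untouched
    refine ⟨shadowPre_call hfr hrsp hun, ?_⟩
    rw [w_rdi, ← ef]
    exact hloop.hand.obj.mono (frames'_sub g A.2)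
  · -- the back edge: `mux < submaps`
    have ea : UInt64.ofNat j * 3 + UInt64.ofNat ch + 2 = addr (Mapping.chan v.mem (mapAt g v.mem i) + 3 * j + 2) := by
      rw [hch]
      apply UInt64.toNat_inj.mp
      rw [toNat_addr _ (by omega)]
      clear hm3 hc3 hfw hmc
      u_omega
    generalize hX : (BitVec.setWidth 8 (BitVec.zeroExtend 32 (BitVec.ofNat 8
      ((v.mem.writeLE (g.e.reg .rsp - 1456) 4 (Word.part .w32 z).toNat).readLE (g.e.reg .rsp - 1456) 1)))).toNat = X
      at hbr_116446 w_mem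
    rw [ea] at hbr_116446 w_mem
    generalize hm1' : (v.mem.writeLE (g.e.reg .rsp - 1456) 4 (Word.part .w32 z).toNat).writeLE (g.e.reg .rsp - 1488) 8
      1139740 = mem1 at hbr_116446 w_mem
    have hs1 : Mem.SameExcept (narrowWins g) v.mem mem1 := by
      rw [← hm1']
      exact (narrow_spill hfr _ _).trans (narrow_push hfr _ _)
    have hn1 := narrow_ok hfr hloop.hand hloop.mid.bits hs1
    have hq1 := Quiet.store hloop hcur hn1.1 j hjC' X
    have hb2 := bits_store hloop hcur hn1.2 j hjC' X
    have hn2 := narrow_ok hfr hloop.hand hb2 (narrow_push hfr _ 1139778)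
    have hq := hq1.then_off hloop hcur hn2.1
    have hbits := hn2.2
    rw [← w_mem] at hq hbits
    -- the byte read back
    have hb64 : Mapping.chan v.mem (mapAt g v.mem i) + 3 * j + 2 + 1 ≤ 2 ^ 64 := by
      rw [hch]
      omega
    have hoff : Mapping.chan v.mem (mapAt g v.mem i) + 3 * j + 2 + 1 ≤ (g.e.reg .rsp - 1488).toNat ∨
        (g.e.reg .rsp - 1488).toNat + 8 ≤ Mapping.chan v.mem (mapAt g v.mem i) + 3 * j + 2 := by
      rw [hch]
      clear hm3 hfw hmc
      u_omega
    have hu : ∀ y : Nat, ((mem1.writeLE (addr (Mapping.chan v.mem (mapAt g v.mem i) + 3 * j + 2)) 1 X).writeLE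
        (g.e.reg .rsp - 1488) 8 y).u8 (Mapping.chan v.mem (mapAt g v.mem i) + 3 * j + 2) = X % 2 ^ 8 := by
      intro y
      rw [Mem.u8_writeLE _ _ _ _ _ (by u_omega) hb64 hoff, Mem.u8_writeLE_same]
    have hval : s_11645a.mem.u8 (Mapping.chan v.mem (mapAt g v.mem i) + 3 * j + 2) <
        Mapping.submaps v.mem (mapAt g v.mem i) := by
      rw [w_mem, hu]
      have h1 := hu 1139763
      unfold Mem.u8 at h1
      rw [h1, byte_roundtrip] at hbr_116446
      have h2 := Nat.mod_le (Mapping.submaps v.mem (mapAt g v.mem i)) 256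
      omega
    have hinv' : abiInv s_11645a := by v_inv
    have hcore := hlp.core.carry hq (Nat.le_refl _) hbits w_rip (by rw [w_rsp, eR]) (w_kept.get .rbp rfl)
      (w_kept.get .rbx rfl) w_eq hinv'
    have hmux := hq.mux_new hloop.maps hcur hval
    have eC := hq.scalars.1
    refine ReachVia.done (Or.inr ⟨⟨hcore.succ (by rw [eC]; exact hjC') hmux, ?_⟩, eC⟩)
    rw [w_r13]
    exact inc_small j hj16
  · -- `error` returned: `jmp 113b22`
    clear hbr_116446 w_r12 w_r12_116450
    v_after_call w_rsp_116450 w_mem_116450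
    have c_rdi : s_116450.reg .rdi = g.e.reg .rdi := w_rdi_116450
    simp only [c_rdi] at w_same
    obtain ⟨hrax, _, _⟩ := w_post
    have ea : UInt64.ofNat j * 3 + UInt64.ofNat ch + 2 = addr (Mapping.chan v.mem (mapAt g v.mem i) + 3 * j + 2) := by
      rw [hch]
      apply UInt64.toNat_inj.mp
      rw [toNat_addr _ (by omega)]
      clear hm3 hc3 hfw hmc
      u_omega
    generalize hX : (BitVec.setWidth 8 (BitVec.zeroExtend 32 (BitVec.ofNat 8
      ((v.mem.writeLE (g.e.reg .rsp - 1456) 4 (Word.part .w32 z).toNat).readLE (g.e.reg .rsp - 1456) 1)))).toNat = X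
      at w_same
    rw [ea] at w_same
    generalize hm1' : (v.mem.writeLE (g.e.reg .rsp - 1456) 4 (Word.part .w32 z).toNat).writeLE (g.e.reg .rsp - 1488) 8
      1139740 = mem1 at w_same
    have hs1 : Mem.SameExcept (narrowWins g) v.mem mem1 := by
      rw [← hm1']
      exact (narrow_spill hfr _ _).trans (narrow_push hfr _ _)
    have hn1 := narrow_ok hfr hloop.hand hloop.mid.bits hs1
    have hq1 := Quiet.store hloop hcur hn1.1 j hjC' X
    have hb2 := bits_store hloop hcur hn1.2 j hjC' X
    have hn2 := narrow_ok hfr hloop.hand hb2 ((narrow_push hfr _ _).trans (narrow_error hfr w_same))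
    have hq := hq1.then_off hloop hcur hn2.1
    have hbits := hn2.2
    clear w_same hs1 hn1 hq1 hb2 hn2
    u_walk hcode [hμ.vendor] until [Vorbis.L.start_decoder.cut4] span [Vorbis.L.textLo, Vorbis.L.textHi] side (v_side)
    rw [← w_mem] at hq hbits
    have hinv' : abiInv s_116455 := by v_inv
    have hpt' := hpt.carry hq hbits w_rip (by rw [w_rsp, eR]) (w_kept.get .rbp rfl) (w_kept.get .rbx rfl) w_eq hinv'
    refine ReachVia.done (Or.inl (hpt'.err ?_))
    rw [w_rax]
    rfl

/-- **Loop 4129** (`for (j = 0; j < f->channels; ++j) m->chan[j].mux = 0;`, head 0x1163ae): from its invariant at any `j` to R12.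
Measure: `channels − r13d`. -/
theorem loop38_all (Lay : Layout) (hLay : Lay.hi = 0x1000000) (μ : Microarch) (hμ : UserX.MicroOK μ) (u₀ : State)
    (hcode : HasCodeNat Lay u₀ Vorbis.L.start_decoder.entry Vorbis.Code.code_start_decoder.nat Vorbis.L.start_decoder.size)
    (h_l4 : Asan.SmallCheck Lay μ Vorbis.WayInv (Vorbis.CodeOK u₀) [.rax, .rcx, .rdx] 4 Vorbis.L.__asan_load4_noabort.entry)
    (h_l8 : Asan.SmallCheck Lay μ Vorbis.WayInv (Vorbis.CodeOK u₀) [.rax, .rcx, .rdx] 8 Vorbis.L.__asan_load8_noabort.entry)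
    (h_s1 : Asan.SmallCheck Lay μ Vorbis.WayInv (Vorbis.CodeOK u₀) [.rax, .rdx] 1 Vorbis.L.__asan_store1_noabort.entry)
    (g : Ghost) (i : Nat) (A7 A7c Ai : Arena) (A : Arena × List Obj) :
    ∀ v : State, (∃ j : Nat, LoopPt u₀ g i Vorbis.L.start_decoder.loop38 j A7 A7c Ai A v) →
      ReachVia Lay μ WayInv v (fun w => AtR12 u₀ g i w ∨ AtERR u₀ g w) := by
  apply ReachVia.loop (fun v => (stb_vorbis.channels v.mem g.f).toNat - (v.reg .r13).toNat)
  intro v hinv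
  obtain ⟨j, hlp⟩ := hinv
  refine (loop38_round Lay hLay μ hμ u₀ hcode h_l4 h_l8 h_s1 g i j A7 A7c Ai A v hlp).mono ?_
  intro w hw
  rcases hw with h12 | ⟨hlp', hjC, eC⟩
  · exact Or.inl (Or.inl h12)
  · refine Or.inr ⟨⟨j + 1, hlp'⟩, ?_⟩
    have hHD := hlp.core.pt.loop.mid.header.HD1
    have e1 : (w.reg .r13).toNat = j + 1 := by
      rw [hlp'.r13, toNat_addr _ (by omega)]
    have e2 : (v.reg .r13).toNat = j := by
      rw [hlp.r13, toNat_addr _ (by omega)]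
    rw [e1, e2, eC]
    omega

/-- **Loop 4123** (`m->chan[j].mux = get_bits(f, 4)`, tested `< m->submaps`; head 0x11645e): from its invariant at any `j` to R12
or to the epilogue. Measure: `channels − r13d`. -/
theorem loop39_all (Lay : Layout) (hLay : Lay.hi = 0x1000000) (μ : Microarch) (hμ : UserX.MicroOK μ) (u₀ : State)
    (hcode : HasCodeNat Lay u₀ Vorbis.L.start_decoder.entry Vorbis.Code.code_start_decoder.nat Vorbis.L.start_decoder.size)
    (h_gb : ∀ (others : List Obj) (frames : List (Nat × FrameLayout)) (Blk : Block → Prop) (len : Nat), Calls Lay μ Vorbis.WayInv (Vorbis.conv u₀) Vorbis.L.get_bits.entry (Vorbis.Spec.get_bits.spec others frames Blk len))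
    (h_err : ∀ (others : List Obj) (frames : List (Nat × FrameLayout)), Calls Lay μ Vorbis.WayInv (Vorbis.conv u₀) Vorbis.L.error.entry (Vorbis.Spec.error.spec others frames))
    (h_l1 : Asan.SmallCheck Lay μ Vorbis.WayInv (Vorbis.CodeOK u₀) [.rax, .rdx] 1 Vorbis.L.__asan_load1_noabort.entry)
    (h_l4 : Asan.SmallCheck Lay μ Vorbis.WayInv (Vorbis.CodeOK u₀) [.rax, .rcx, .rdx] 4 Vorbis.L.__asan_load4_noabort.entry)
    (h_l8 : Asan.SmallCheck Lay μ Vorbis.WayInv (Vorbis.CodeOK u₀) [.rax, .rcx, .rdx] 8 Vorbis.L.__asan_load8_noabort.entry)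
    (h_s1 : Asan.SmallCheck Lay μ Vorbis.WayInv (Vorbis.CodeOK u₀) [.rax, .rdx] 1 Vorbis.L.__asan_store1_noabort.entry)
    (g : Ghost) (i : Nat) (A7 A7c Ai : Arena) (A : Arena × List Obj) :
    ∀ v : State, (∃ j : Nat, LoopPt u₀ g i Vorbis.L.start_decoder.loop39 j A7 A7c Ai A v) →
      ReachVia Lay μ WayInv v (fun w => AtR12 u₀ g i w ∨ AtERR u₀ g w) := by
  apply ReachVia.loop (fun v => (stb_vorbis.channels v.mem g.f).toNat - (v.reg .r13).toNat)
  intro v hinv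
  obtain ⟨j, hlp⟩ := hinv
  refine (loop39_head Lay hLay μ hμ u₀ hcode h_gb h_l4 g i j A7 A7c Ai A v hlp).trans ?_
  intro w hw
  rcases hw with h12 | ⟨hlp1, hjC, eC⟩
  · exact ReachVia.done (Or.inl (Or.inl h12))
  · refine (loop39_body Lay hLay μ hμ u₀ hcode h_err h_l1 h_l8 h_s1 g i j A7 A7c Ai A w hlp1 (by rw [eC]; exact hjC)).mono ?_
    intro w' hw'
    rcases hw' with herr | ⟨hlp', eC'⟩
    · exact Or.inl (Or.inr herr)
    · refine Or.inr ⟨⟨j + 1, hlp'⟩, ?_⟩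
      have hHD := hlp.core.pt.loop.mid.header.HD1
      have e1 : (w'.reg .r13).toNat = j + 1 := by
        rw [hlp'.r13, toNat_addr _ (by omega)]
      have e2 : (v.reg .r13).toNat = j := by
        rw [hlp.r13, toNat_addr _ (by omega)]
      rw [e1, e2, eC', eC]
      omega

end Vorbis.Spec.start_decoder_R11

/-- Segment R11 of `start_decoder` (0x11635d … 0x116480; C lines 4121 – 4130: the reserved bits, `mux[j]`): from `AtR11` to `AtR12`
(MP5 established) or to the epilogue `AtERR`. The pieces: `entry_to_bits2`, `bits2_to_heads`, the two loops. -/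
theorem Vorbis.Spec.Worked.start_decoder_R11_ok : Vorbis.Spec.start_decoder_R11.Statement := by
  intro Lay hLay μ hμ u₀ hcode h_gb h_err h_l1 h_l4 h_l8 h_s1 g i v hat
  obtain ⟨A7, A7c, Ai, A, hbody⟩ := hat
  have hpt : Vorbis.Spec.start_decoder_R11.Pt u₀ g i Vorbis.Spec.StartDecoder.pc_R11 A7 A7c Ai A v :=
    ⟨hbody.loop, hbody.rbx, hbody.cur⟩
  refine (Vorbis.Spec.start_decoder_R11.entry_to_bits2 Lay hLay μ hμ u₀ hcode h_gb g i A7 A7c Ai A v hpt).trans ?_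
  intro w hw
  refine (Vorbis.Spec.start_decoder_R11.bits2_to_heads Lay hLay μ hμ u₀ hcode h_err h_l1 g i A7 A7c Ai A w hw).trans ?_
  intro w' hw'
  rcases hw' with h38 | h39 | herr
  · exact Vorbis.Spec.start_decoder_R11.loop38_all Lay hLay μ hμ u₀ hcode h_l4 h_l8 h_s1 g i A7 A7c Ai A w' ⟨0, h38⟩
  · exact Vorbis.Spec.start_decoder_R11.loop39_all Lay hLay μ hμ u₀ hcode h_gb h_err h_l1 h_l4 h_l8 h_s1 g i A7 A7c Ai A w'
      ⟨0, h39⟩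
  · exact X86.User.ReachVia.done (Or.inr herr)
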